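-- pv_equiv track=rewrite | github.com/mtauha/Daily-Leetcode | delete-characters-to-make-fancy-string.py | makeFancyString2
-- ===== SOURCE A (Python) =====
-- def makeFancyString2(s: str) -> str:
--     last = s[0]
--     count = 1
--     ans = s[0]
--
--     for i in range(1, len(s)):
--         if s[i] == last:
--             count += 1
--         else:
--             count = 1
--             last = s[i]
--
--         if count < 3:
--             ans += s[i]
--
--     return ans
-- ===== SOURCE B (Python) =====
-- def makeFancyString2(s: str) -> str:
--     # Run-based: scan maximal runs of equal chars, emit at most 2 of each.
--     parts = []
--     i = 0
--     n = len(s)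
--     while i < n:
--         j = i
--         while j < n and s[j] == s[i]:
--             j += 1
--         parts.append(s[i] * min(2, j - i))
--         i = j
--     return "".join(parts)
-- ===== Notes on version B (the rewrite author's own statement) =====
-- stated objective: alternative
-- what changed: B replaces A's per-character running counter (last/count/ans state) with a run-based decomposition: scan each maximal run of equal characters and emit min(2, run length) copies, joining the parts.
import Mathlib
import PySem

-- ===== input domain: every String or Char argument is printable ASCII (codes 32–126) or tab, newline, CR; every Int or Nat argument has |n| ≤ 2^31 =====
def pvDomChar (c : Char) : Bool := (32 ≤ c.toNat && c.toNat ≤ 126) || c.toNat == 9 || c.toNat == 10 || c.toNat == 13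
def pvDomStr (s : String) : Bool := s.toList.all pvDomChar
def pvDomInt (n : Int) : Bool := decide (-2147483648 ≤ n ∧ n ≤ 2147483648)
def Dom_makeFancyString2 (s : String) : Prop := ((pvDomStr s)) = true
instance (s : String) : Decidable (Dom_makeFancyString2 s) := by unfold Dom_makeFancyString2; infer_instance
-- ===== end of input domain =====

-- B replaces A's per-character running counter with a run-based scan emitting min(2, run length) copies per run.
-- The equivalence is about the return value on nonempty strings; on "" A raises (s[0]) while B returns "".

-- ===== PORT A =====
-- the for-loop of A: state (last, count, ans), one step per remaining character
def goA : List Char → Char → Int → List Char → List Char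
  | [], _, _, ans => ans
  | c :: rest, last, count, ans =>
    if c = last then
      let count := count + 1
      let ans := if count < 3 then ans ++ [c] else ans
      goA rest last count ans
    else
      let count : Int := 1
      let last := c
      let ans := if count < 3 then ans ++ [c] else ans
      goA rest last count ans

def makeFancyString2 (s : String) : String :=
  match s.toList with
  | [] => ""   -- Python raises IndexError on s[0] here; excluded by Pre_makeFancyString2
  | c :: rest => String.ofList (goA rest c 1 [c])

-- ===== PORT B =====
-- the outer while-loop of Source B: each step consumes one maximal run (inner scan = takeWhile/dropWhile)
def runsB : List Char → List Char
  | [] => []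
  | c :: rest =>
    List.replicate (min 2 ((rest.takeWhile (· = c)).length + 1)) c
      ++ runsB (rest.dropWhile (· = c))
termination_by l => l.length
decreasing_by
  simpa using Nat.lt_succ_of_le (List.length_dropWhile_le _ _)

def makeFancyString2_alt (s : String) : String := String.ofList (runsB s.toList)

-- ===== PRECONDITION & SPEC =====
-- Pre_ excludes exactly the empty string, on which A raises IndexError (unconditional s[0]).
def Pre_makeFancyString2 (s : String) : Prop := s ≠ ""
instance (s : String) : Decidable (Pre_makeFancyString2 s) := by unfold Pre_makeFancyString2; infer_instance
def pvWitness_makeFancyString2 : String := "aaabcc"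

def Spec_makeFancyString2 (s : String) (out : String) : Prop := out = makeFancyString2_alt s
instance (s : String) (out : String) : Decidable (Spec_makeFancyString2 s out) := by unfold Spec_makeFancyString2; infer_instance

-- ===== CLAIM =====
def Claim_equal_makeFancyString2 : Prop := ∀ (s : String), Dom_makeFancyString2 s → Pre_makeFancyString2 s → Spec_makeFancyString2 s (makeFancyString2 s)
-- ===== LEMMAS AND PROOFS =====

-- A's loop with the accumulator stripped out
def emitA : List Char → Char → Int → List Char
  | [], _, _ => []
  | c :: rest, last, count =>
    if c = last then (if count + 1 < 3 then [c] else []) ++ emitA rest last (count + 1)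
    else c :: emitA rest c 1

theorem goA_eq_emit (l : List Char) : ∀ (last : Char) (count : Int) (ans : List Char),
    goA l last count ans = ans ++ emitA l last count := by
  induction l with
  | nil => intro _ _ _; simp [goA, emitA]
  | cons c rest ih =>
    intro last count ans
    by_cases h : c = last
    · simp only [goA, emitA, if_pos h, ih]
      split_ifs <;> simp [h]
    · simp only [goA, emitA, if_neg h, ih]
      norm_num

theorem rep_step (c : Char) (t : Nat) (k : Int) (hk : 1 ≤ k) :
    (if k + 1 < 3 then [c] else []) ++ List.replicate (min t (1 - k).toNat) c
      = List.replicate (min (t + 1) (2 - k).toNat) c := by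
  by_cases h : k + 1 < 3
  · have hk1 : k = 1 := by omega
    subst hk1
    simp [List.replicate_succ]
  · have h2 : (2 - k).toNat = 0 := by omega
    have h1 : (1 - k).toNat = 0 := by omega
    simp [h, h1, h2]

theorem emitA_run (l : List Char) : ∀ (c : Char) (k : Int), 1 ≤ k →
    emitA l c k = List.replicate (min (l.takeWhile (· = c)).length (2 - k).toNat) c
      ++ (match l.dropWhile (· = c) with
          | [] => []
          | x :: rest => x :: emitA rest x 1) := by
  induction l with
  | nil => intro c k _; simp [emitA]
  | cons x rest ih =>
    intro c k hk
    by_cases h : x = c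
    · subst h
      have h21 : (2 - (k + 1) : Int) = 1 - k := by ring
      have := ih x (k + 1) (by omega)
      simp only [emitA, this, h21, List.takeWhile, List.dropWhile, decide_true, if_true,
        List.length_cons, ← List.append_assoc]
      rw [rep_step x _ k hk]
    · simp [emitA, h, List.takeWhile, List.dropWhile]

theorem emit_runs (n : Nat) : ∀ (l : List Char), l.length ≤ n → ∀ c : Char,
    c :: emitA l c 1 = runsB (c :: l) := by
  induction n with
  | zero =>
    intro l hl c
    have : l = [] := List.eq_nil_of_length_eq_zero (Nat.le_zero.mp hl)
    subst this
    simp [emitA, runsB]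
  | succ n ih =>
    intro l hl c
    rw [emitA_run l c 1 le_rfl, runsB]
    have h1 : ((2:Int) - 1).toNat = 1 := by norm_num
    rw [h1]
    have hmin : min 2 ((l.takeWhile (· = c)).length + 1)
        = min (l.takeWhile (· = c)).length 1 + 1 := by omega
    rw [hmin, List.replicate_succ, List.cons_append]
    congr 1
    congr 1
    cases hd : l.dropWhile (· = c) with
    | nil => simp [runsB]
    | cons x rest =>
      have hlen : rest.length ≤ n := by
        have h1 := List.length_dropWhile_le (fun y => decide (y = c)) l
        rw [hd] at h1
        simp at h1
        omega
      show x :: emitA rest x 1 = runsB (x :: rest)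
      exact ih rest hlen x

-- ===== VERDICT =====
theorem makeFancyString2_spec : Claim_equal_makeFancyString2 := by
  intro s _ hp
  unfold Spec_makeFancyString2 makeFancyString2 makeFancyString2_alt
  cases h : s.toList with
  | nil =>
    exact absurd (by simpa using congrArg String.ofList h) hp
  | cons c rest =>
    simp only [goA_eq_emit, List.singleton_append]
    rw [emit_runs rest.length rest le_rfl c]
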